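-- pv_equiv track=rewrite | github.com/omtripathi786/scaler_practice_data_structure | Module_2/intro_to_array/count_elem.py | solve
-- ===== SOURCE A (Python) =====
-- def solve(A):
--     max_count = 0
--     max_elem = 0
--     for x in A:
--         if x == max_elem:
--             max_count += 1
--         elif x > max_elem:
--             max_elem = x
--             max_count = 1
--     return len(A) - max_count
-- ===== SOURCE B (Python) =====
-- def solve(A):
--     if not A:
--         return 0
--     m = max(max(A), 0)
--     return len(A) - A.count(m)
-- ===== Notes on version B (the rewrite author's own statement) =====
-- stated objective: simpler
-- what changed: Replaces the single-pass running-max-with-tally loop by a two-pass max-then-count: compute the 0-clamped maximum first, then subtract its occurrence count from the length.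
import Mathlib
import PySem

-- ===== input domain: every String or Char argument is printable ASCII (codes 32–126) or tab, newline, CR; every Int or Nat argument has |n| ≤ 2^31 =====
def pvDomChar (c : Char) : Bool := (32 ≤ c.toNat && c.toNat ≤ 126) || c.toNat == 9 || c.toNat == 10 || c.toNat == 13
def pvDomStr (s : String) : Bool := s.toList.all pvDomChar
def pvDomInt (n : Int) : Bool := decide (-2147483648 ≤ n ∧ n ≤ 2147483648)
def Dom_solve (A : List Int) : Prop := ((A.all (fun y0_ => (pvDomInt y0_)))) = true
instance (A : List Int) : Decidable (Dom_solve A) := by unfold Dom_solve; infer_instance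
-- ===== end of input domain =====

-- ===== PORT A =====
-- literal port of A: fold over A with state (max_count, max_elem)
def solve (A : List Int) : Int :=
  let st := A.foldl (fun (s : Int × Int) x =>
    if x = s.2 then (s.1 + 1, s.2)
    else if x > s.2 then (1, x)
    else s) (0, 0)
  (A.length : Int) - st.1

-- ===== PORT B =====
-- literal port of B: guard empty, clamped max, then count
def solve_alt (A : List Int) : Int :=
  match PySem.List.max? A (fun x => x) with
  | none => 0
  | some mx => (A.length : Int) - PySem.List.count A (max mx 0)

-- ===== PRECONDITION & SPEC =====
def Spec_solve (A : List Int) (out : Int) : Prop := out = solve_alt A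
instance (A : List Int) (out : Int) : Decidable (Spec_solve A out) := by unfold Spec_solve; infer_instance

-- ===== CLAIM (what is proved, stated in full; the proofs are below) =====
def Claim_equal_solve : Prop := ∀ (A : List Int), Dom_solve A → Spec_solve A (solve A)

-- ===== LEMMAS AND PROOFS =====

-- ===== VERDICT (by name: the statement is the Claim_ definition above) =====
theorem foldl_max_le (l : List Int) (i b : Int) (hi : i ≤ b) (h : ∀ y ∈ l, y ≤ b) :
    l.foldl max i ≤ b := by
  induction l generalizing i with
  | nil => simpa using hi
  | cons x xs ih =>
    simp only [List.foldl_cons]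
    exact ih _ (max_le hi (h x (by simp))) (fun y hy => h y (by simp [hy]))

theorem le_foldl_max_init (l : List Int) (i : Int) : i ≤ l.foldl max i := by
  induction l generalizing i with
  | nil => simp
  | cons x xs ih =>
    simp only [List.foldl_cons]
    exact le_trans (le_max_left _ _) (ih _)

theorem mem_le_foldl_max (l : List Int) (i y : Int) (hy : y ∈ l) : y ≤ l.foldl max i := by
  induction l generalizing i with
  | nil => cases hy
  | cons x xs ih =>
    simp only [List.foldl_cons]
    rcases List.mem_cons.1 hy with rfl | h
    · exact le_trans (le_max_right _ _) (le_foldl_max_init _ _)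
    · exact ih _ h

-- invariant of A's loop: after a prefix p the state is (count of (clamped max) in p, clamped max of p)
theorem solve_foldl_inv (p : List Int) :
    p.foldl (fun (s : Int × Int) x =>
      if x = s.2 then (s.1 + 1, s.2)
      else if x > s.2 then (1, x)
      else s) (0, 0) = ((p.count (p.foldl max 0) : Int), p.foldl max 0) := by
  induction p using List.reverseRecOn with
  | nil => simp
  | append_singleton p x ih =>
    rw [List.foldl_append, List.foldl_append, ih]
    simp only [List.foldl_cons, List.foldl_nil, List.count_append]
    set M := p.foldl max 0 with hM
    by_cases hx : x = M
    · subst hx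
      simp [max_self]
    · by_cases hgt : x > M
      · have hmax : max M x = x := max_eq_right (le_of_lt hgt)
        have hc0 : p.count x = 0 := by
          rw [List.count_eq_zero]
          intro hmem
          exact absurd (mem_le_foldl_max p 0 x hmem) (not_le.2 hgt)
        simp [hx, hgt, hmax, hc0]
      · have hlt : x < M := lt_of_le_of_ne (not_lt.1 hgt) hx
        have hmax : max M x = M := max_eq_left (le_of_lt hlt)
        simp [hx, hgt, hmax]

theorem clamped_max_eq (A : List Int) (mx : Int)
    (h : PySem.List.max? A (fun x => x) = some mx) : max mx 0 = A.foldl max 0 := by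
  have hmem : mx ∈ A := PySem.List.max?_mem h
  have hmax : ∀ y ∈ A, y ≤ mx := PySem.List.max?_isMax h
  apply le_antisymm
  · exact max_le (mem_le_foldl_max A 0 mx hmem) (le_foldl_max_init A 0)
  · exact foldl_max_le A 0 (max mx 0) (le_max_right _ _)
      (fun y hy => le_trans (hmax y hy) (le_max_left _ _))

theorem solve_spec : Claim_equal_solve := by
  intro A _
  unfold Spec_solve solve solve_alt
  cases hm : PySem.List.max? A (fun x => x) with
  | none =>
    have : A = [] := (PySem.List.max?_eq_none_iff A (fun x => x)).1 hm
    subst this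
    simp
  | some mx =>
    simp only [solve_foldl_inv]
    rw [← clamped_max_eq A mx hm]
    simp [PySem.List.count_eq]
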